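-- pv_equiv track=rewrite | github.com/mgspollo/AdventOfCode | 2023/days_11-20/12_hot_springs.py | find_unique_string_arrangements
-- ===== SOURCE A (Python) =====
-- def find_unique_string_arrangements(lengths, total_length, current_position=0, current_arrangement=[]):
--     # Base case: if the lengths list is empty, check if the remaining length is 0
--     if current_position == len(lengths):
--         return [current_arrangement] if sum(current_arrangement) == total_length else []
--
--     # Recursive case: try placing the current string and move to the next position
--     current_length = lengths[current_position]
--     arrangements = []
--
--     # Case 1: Add the current string and move to the next position
--     if sum(current_arrangement) + current_length <= total_length:
--         new_arrangement = current_arrangement + [current_length]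
--         remaining_arrangements = find_unique_string_arrangements(
--             lengths, total_length, current_position + 1, new_arrangement
--         )
--         arrangements.extend(remaining_arrangements)
--
--     # Case 2: Move to the next position without adding the current string
--     remaining_arrangements = find_unique_string_arrangements(
--         lengths, total_length, current_position + 1, current_arrangement
--     )
--     arrangements.extend(remaining_arrangements)
--
--     return arrangements
-- ===== SOURCE B (Python) =====
-- def find_unique_string_arrangements(lengths, total_length, current_position=0, current_arrangement=[]):
--     # Iterative level-wise expansion: keep all partial (arrangement, sum) states,
--     # expand include-then-exclude per position, filter full states at the end.
--     states = [(current_arrangement, sum(current_arrangement))]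
--     for pos in range(current_position, len(lengths)):
--         current_length = lengths[pos]
--         next_states = []
--         for arr, s in states:
--             if s + current_length <= total_length:
--                 next_states.append((arr + [current_length], s + current_length))
--             next_states.append((arr, s))
--         states = next_states
--     return [arr for arr, s in states if s == total_length]
-- ===== Notes on version B (the rewrite author's own statement) =====
-- stated objective: alternative
-- what changed: Replaces the binary recursion with an iterative level-wise expansion: a worklist of (arrangement, running-sum) states is expanded position by position (include-then-exclude, preserving the DFS leaf order) and filtered at the end.
import Mathlib
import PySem

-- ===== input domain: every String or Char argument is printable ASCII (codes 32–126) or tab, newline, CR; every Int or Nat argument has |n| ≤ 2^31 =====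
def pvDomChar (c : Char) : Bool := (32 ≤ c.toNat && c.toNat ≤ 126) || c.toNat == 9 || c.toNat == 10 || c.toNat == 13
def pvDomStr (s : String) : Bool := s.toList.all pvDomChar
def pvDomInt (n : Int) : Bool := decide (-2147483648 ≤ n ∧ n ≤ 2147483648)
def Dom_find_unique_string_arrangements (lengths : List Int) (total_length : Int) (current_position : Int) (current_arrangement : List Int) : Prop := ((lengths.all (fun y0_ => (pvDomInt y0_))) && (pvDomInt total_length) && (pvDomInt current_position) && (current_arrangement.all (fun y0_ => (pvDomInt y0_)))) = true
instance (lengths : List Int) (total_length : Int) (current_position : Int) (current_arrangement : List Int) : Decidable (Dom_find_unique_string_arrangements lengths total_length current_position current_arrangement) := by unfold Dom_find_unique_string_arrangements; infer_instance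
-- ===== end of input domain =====

-- B replaces the binary recursion by an iterative level-wise worklist expansion (same cost, different structure).

-- ===== PORT A =====
def find_unique_string_arrangements (lengths : List Int) (total_length : Int) (current_position : Int) (current_arrangement : List Int) : List (List Int) :=
  if current_position = (lengths.length : Int) then
    (if current_arrangement.sum = total_length then [current_arrangement] else [])
  else
    match h : PySem.List.pyGet? lengths current_position with
    | none => []  -- IndexError in Python; excluded by Pre_
    | some current_length =>
      (if current_arrangement.sum + current_length ≤ total_length then
        find_unique_string_arrangements lengths total_length (current_position + 1) (current_arrangement ++ [current_length])
       else []) ++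
      find_unique_string_arrangements lengths total_length (current_position + 1) current_arrangement
termination_by ((lengths.length : Int) - current_position).toNat
decreasing_by
  all_goals {
    have hin : ¬ PySem.List.pyGet? lengths current_position = none := by simp [h]
    rw [PySem.List.pyGet?_eq_none_iff] at hin
    have := not_not.mp hin
    simp [PySem.Raise.InRange] at this
    omega }

-- ===== PORT B =====
def find_unique_string_arrangements_alt (lengths : List Int) (total_length : Int) (current_position : Int) (current_arrangement : List Int) : List (List Int) :=
  let init : List (List Int × Int) := [(current_arrangement, current_arrangement.sum)]
  let states :=
    (PySem.List.pyRange current_position (lengths.length : Int) 1).foldl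
      (fun states pos =>
        match PySem.List.pyGet? lengths pos with
        | none => states  -- IndexError in Python; excluded by Pre_
        | some current_length =>
          states.foldl
            (fun acc q =>
              (if q.2 + current_length ≤ total_length then
                 acc ++ [(q.1 ++ [current_length], q.2 + current_length)]
               else acc) ++ [q])
            [])
      init
  states.foldl (fun acc q => if q.2 = total_length then acc ++ [q.1] else acc) []

-- ===== PRECONDITION & SPEC =====
-- Pre_ excludes exactly the inputs where Python A raises IndexError at lengths[current_position].
def Pre_find_unique_string_arrangements (lengths : List Int) (total_length : Int) (current_position : Int) (current_arrangement : List Int) : Prop :=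
  -(lengths.length : Int) ≤ current_position ∧ current_position ≤ (lengths.length : Int)
instance (lengths : List Int) (total_length : Int) (current_position : Int) (current_arrangement : List Int) : Decidable (Pre_find_unique_string_arrangements lengths total_length current_position current_arrangement) := by unfold Pre_find_unique_string_arrangements; infer_instance
def pvWitness_find_unique_string_arrangements : List Int × Int × Int × List Int := ([1, 2, 3], 4, 0, [])

def Spec_find_unique_string_arrangements (lengths : List Int) (total_length : Int) (current_position : Int) (current_arrangement : List Int) (out : List (List Int)) : Prop := out = find_unique_string_arrangements_alt lengths total_length current_position current_arrangement
instance (lengths : List Int) (total_length : Int) (current_position : Int) (current_arrangement : List Int) (out : List (List Int)) : Decidable (Spec_find_unique_string_arrangements lengths total_length current_position current_arrangement out) := by unfold Spec_find_unique_string_arrangements; infer_instance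

-- ===== CLAIM (what is proved, stated in full; the proofs are below) =====
def Claim_equal_find_unique_string_arrangements : Prop := ∀ (lengths : List Int) (total_length : Int) (current_position : Int) (current_arrangement : List Int), Dom_find_unique_string_arrangements lengths total_length current_position current_arrangement → Pre_find_unique_string_arrangements lengths total_length current_position current_arrangement → Spec_find_unique_string_arrangements lengths total_length current_position current_arrangement (find_unique_string_arrangements lengths total_length current_position current_arrangement)

-- ===== LEMMAS AND PROOFS =====

-- One expansion step of B, in flatMap form.
def pvStep (lengths : List Int) (total_length : Int) (states : List (List Int × Int)) (pos : Int) : List (List Int × Int) :=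
  match PySem.List.pyGet? lengths pos with
  | none => states
  | some current_length =>
    states.foldl
      (fun acc q =>
        (if q.2 + current_length ≤ total_length then
           acc ++ [(q.1 ++ [current_length], q.2 + current_length)]
         else acc) ++ [q])
      []

-- Inner foldl of B equals a flatMap.
theorem pvInner_eq_flatMap (total_length cl : Int) (states acc : List (List Int × Int)) :
    states.foldl
      (fun acc q =>
        (if q.2 + cl ≤ total_length then acc ++ [(q.1 ++ [cl], q.2 + cl)] else acc) ++ [q])
      acc
    = acc ++ states.flatMap (fun q =>
        (if q.2 + cl ≤ total_length then [(q.1 ++ [cl], q.2 + cl)] else []) ++ [q]) := by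
  induction states generalizing acc with
  | nil => simp
  | cons q rest ih =>
    simp only [List.foldl_cons, List.flatMap_cons, ih]
    split_ifs <;> simp

-- The final filter of B equals a flatMap.
theorem pvFinal_eq_flatMap (total_length : Int) (states : List (List Int × Int)) (acc : List (List Int)) :
    states.foldl (fun acc q => if q.2 = total_length then acc ++ [q.1] else acc) acc
    = acc ++ states.flatMap (fun q => if q.2 = total_length then [q.1] else []) := by
  induction states generalizing acc with
  | nil => simp
  | cons q rest ih =>
    simp only [List.foldl_cons, List.flatMap_cons, ih]
    split_ifs <;> simp

-- pvStep maps the empty worklist to the empty worklist.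
theorem pvStep_nil (lengths : List Int) (total_length : Int) (pos : Int) :
    pvStep lengths total_length [] pos = [] := by
  unfold pvStep
  cases PySem.List.pyGet? lengths pos <;> rfl

theorem pvRun_nil (lengths : List Int) (total_length : Int) (l : List Int) :
    l.foldl (pvStep lengths total_length) [] = [] := by
  induction l with
  | nil => rfl
  | cons pos rest ih => simp only [List.foldl_cons, pvStep_nil, ih]

-- pvStep distributes over ++.
theorem pvStep_append (lengths : List Int) (total_length : Int) (s t : List (List Int × Int)) (pos : Int) :
    pvStep lengths total_length (s ++ t) pos
      = pvStep lengths total_length s pos ++ pvStep lengths total_length t pos := by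
  unfold pvStep
  cases PySem.List.pyGet? lengths pos with
  | none => rfl
  | some cl => simp [pvInner_eq_flatMap]

-- Folding pvStep over any position list distributes over ++.
theorem pvRun_append (lengths : List Int) (total_length : Int) (l : List Int) (s t : List (List Int × Int)) :
    l.foldl (pvStep lengths total_length) (s ++ t)
      = l.foldl (pvStep lengths total_length) s ++ l.foldl (pvStep lengths total_length) t := by
  induction l generalizing s t with
  | nil => rfl
  | cons pos rest ih => simp only [List.foldl_cons, pvStep_append, ih]

-- B's whole pipeline starting from one state.
def pvPipe (lengths : List Int) (total_length : Int) (p : Int) (arr : List Int) : List (List Int) :=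
  ((PySem.List.pyRange p (lengths.length : Int) 1).foldl (pvStep lengths total_length) [(arr, arr.sum)]).flatMap
    (fun q => if q.2 = total_length then [q.1] else [])

theorem pvPipe_eq_A (lengths : List Int) (total_length : Int) (k : Nat) :
    ∀ (p : Int) (arr : List Int), ((lengths.length : Int) - p).toNat = k →
      -(lengths.length : Int) ≤ p → p ≤ (lengths.length : Int) →
      pvPipe lengths total_length p arr = find_unique_string_arrangements lengths total_length p arr := by
  induction k with
  | zero =>
    intro p arr hk h1 h2
    have hp : p = (lengths.length : Int) := by omega
    subst hp
    rw [find_unique_string_arrangements]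
    simp only [pvPipe, PySem.List.pyRange_one_eq_nil (le_refl _), List.foldl_nil,
      List.flatMap_cons, List.flatMap_nil, List.append_nil]
    split_ifs <;> simp
  | succ k ih =>
    intro p arr hk h1 h2
    have hplt : p < (lengths.length : Int) := by omega
    have hne : PySem.List.pyGet? lengths p ≠ none := by
      intro hnone
      rw [PySem.List.pyGet?_eq_none_iff] at hnone
      simp [PySem.Raise.InRange] at hnone
      omega
    obtain ⟨cl, hcl⟩ := Option.ne_none_iff_exists'.mp hne
    rw [find_unique_string_arrangements]
    rw [if_neg (by omega), hcl]
    show pvPipe lengths total_length p arr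
      = (if arr.sum + cl ≤ total_length then
           find_unique_string_arrangements lengths total_length (p+1) (arr ++ [cl])
         else []) ++ find_unique_string_arrangements lengths total_length (p+1) arr
    unfold pvPipe
    rw [PySem.List.pyRange_one_cons hplt, List.foldl_cons]
    have hstep : pvStep lengths total_length [(arr, arr.sum)] p
        = (if arr.sum + cl ≤ total_length then [(arr ++ [cl], arr.sum + cl)] else []) ++ [(arr, arr.sum)] := by
      unfold pvStep
      rw [hcl]
      simp [pvInner_eq_flatMap]
    rw [hstep, pvRun_append, List.flatMap_append]
    have hsum : (arr ++ [cl]).sum = arr.sum + cl := by simp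
    have hrec1 : ((PySem.List.pyRange (p+1) (lengths.length : Int) 1).foldl (pvStep lengths total_length) [(arr, arr.sum)]).flatMap
        (fun q => if q.2 = total_length then [q.1] else [])
        = find_unique_string_arrangements lengths total_length (p+1) arr :=
      ih (p+1) arr (by omega) (by omega) (by omega)
    by_cases hc : arr.sum + cl ≤ total_length
    · rw [if_pos hc, if_pos hc]
      have hrec0 : ((PySem.List.pyRange (p+1) (lengths.length : Int) 1).foldl (pvStep lengths total_length) [(arr ++ [cl], arr.sum + cl)]).flatMap
          (fun q => if q.2 = total_length then [q.1] else [])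
          = find_unique_string_arrangements lengths total_length (p+1) (arr ++ [cl]) := by
        have := ih (p+1) (arr ++ [cl]) (by omega) (by omega) (by omega)
        unfold pvPipe at this
        rwa [hsum] at this
      rw [hrec0, hrec1]
    · rw [if_neg hc, if_neg hc]
      rw [pvRun_nil]
      simp only [List.flatMap_nil, List.nil_append]
      exact hrec1

theorem pvAlt_eq_pipe (lengths : List Int) (total_length : Int) (p : Int) (arr : List Int) :
    find_unique_string_arrangements_alt lengths total_length p arr = pvPipe lengths total_length p arr := by
  unfold find_unique_string_arrangements_alt pvPipe pvStep
  rw [pvFinal_eq_flatMap]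
  simp

-- ===== VERDICT (by name: the statement is the Claim_ definition above) =====
theorem find_unique_string_arrangements_spec : Claim_equal_find_unique_string_arrangements := by
  intro lengths total_length p arr _ hpre
  unfold Spec_find_unique_string_arrangements
  rw [pvAlt_eq_pipe, pvPipe_eq_A lengths total_length (((lengths.length : Int) - p).toNat) p arr rfl hpre.1 hpre.2]
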